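-- pv_equiv track=rewrite | github.com/mkbabb/lottery-analysis | keno/scripts/bit_manipulations.py | bits_to_nums
-- ===== SOURCE A (Python) =====
-- from typing import Any, Callable, Dict, List, Optional, Union
--
-- def bits_to_nums(bits: List[int],
--                  bit_length: int,
--                  delim: str = None,
--                  num_length: int = None) -> str:
--     '''
--     Converts an array of integers (therein an array of bit flags), into a
--     sequence of numbers deliminated by 'delim' or separated by 'num_length'.
--
--     The function simply bit shifts each number therein 'bits' by 1 until a subsequent AND
--     with 1 results in a non-zero value.
--
--     @param bits: array of bit flags masquerading as integers.
--     @param delim: delimiter used for 'nums'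
--     @param bit_length: the interval therewith the integers are sized.
--     @param num_length: if no delimiter is provided, split 'nums' at every 'num_length' interval.
--
--     @param return: string of numbers deliminated by either 'delim' or 'num_length'
--     '''
--     nums = ""
--     for n, i in enumerate(bits):
--         num = n * bit_length
--         while (i != 0):
--             if (i & 1 != 0):
--                 nums += f"{num}" if delim is None else f"{num}{delim}"
--             num += 1
--             i >>= 1
--     return nums if delim is None else nums[:-len(delim)]
-- ===== SOURCE B (Python) =====
-- def bits_to_nums(bits, bit_length, delim=None, num_length=None):
--     parts = []
--     for n, x in enumerate(bits):
--         base = n * bit_length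
--         while x > 0:
--             lsb = x & -x
--             parts.append(str(base + lsb.bit_length() - 1))
--             x -= lsb
--     return ("" if delim is None else delim).join(parts)
-- ===== Notes on version B (the rewrite author's own statement) =====
-- stated objective: alternative
-- what changed: B visits only the set bits of each mask via lowest-bit extraction (lsb = x & -x, position = lsb.bit_length()-1), collecting number strings in a list joined once with the delimiter, instead of A's bit-by-bit shift loop over every bit position with string concatenation and a trailing-delimiter slice trim.
-- intended difference: On inputs with delim = '' and at least one positive mask, A returns '' (its nums[:-len(delim)] trim is nums[:0]) while B returns the concatenated numbers, the intended value for an empty delimiter. — e.g. on bits_to_nums([1], 1, some "", none): A returns "", B returns "0"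
import Mathlib
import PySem

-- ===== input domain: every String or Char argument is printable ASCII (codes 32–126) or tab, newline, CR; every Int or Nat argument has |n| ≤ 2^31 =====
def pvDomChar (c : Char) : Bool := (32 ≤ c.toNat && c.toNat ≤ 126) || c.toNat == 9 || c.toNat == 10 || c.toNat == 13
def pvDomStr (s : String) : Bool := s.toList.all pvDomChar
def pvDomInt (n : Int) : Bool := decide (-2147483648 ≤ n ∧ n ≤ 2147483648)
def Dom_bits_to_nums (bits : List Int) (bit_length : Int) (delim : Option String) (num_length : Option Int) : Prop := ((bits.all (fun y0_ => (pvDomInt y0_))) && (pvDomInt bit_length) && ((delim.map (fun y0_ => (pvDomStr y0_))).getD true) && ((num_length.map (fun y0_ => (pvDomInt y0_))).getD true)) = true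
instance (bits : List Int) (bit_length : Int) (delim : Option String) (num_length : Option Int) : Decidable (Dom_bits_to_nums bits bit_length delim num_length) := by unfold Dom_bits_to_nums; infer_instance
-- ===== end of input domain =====

-- B re-implements the conversion by extracting only the SET bits of each mask with x & -x
-- (collecting the pieces in a list and joining once) instead of shifting through every bit
-- and trimming a trailing delimiter; objective: alternative (different algorithm, no speed claim).
-- On delim = "" with a set bit present A returns "" (its nums[:-0] trim) while B returns the numbers: see D_ below.

-- ===== PORT A =====
-- Python's inner loop runs 'while i != 0'; for i < 0 it never terminates (i >>= 1 stays -1),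
-- so those inputs are outside Pre_. The Nat fuel (i.toNat bounds the number of halvings of a
-- nonnegative i) and the 0 < i guard only make the same computation total.
def pvInnerA (delim : Option String) : Nat → Int → Int → List Char → List Char
  | 0, _, _, acc => acc
  | f + 1, i, num, acc =>
    if 0 < i then
      pvInnerA delim f (i >>> (1 : Nat)) (num + 1)
        (if PySem.Int.band i 1 ≠ 0 then
          acc ++ (match delim with
                  | none => PySem.Int.toChars num
                  | some d => PySem.Int.toChars num ++ d.toList)
        else acc)
    else acc

def bits_to_nums (bits : List Int) (bit_length : Int) (delim : Option String) (num_length : Option Int) : String :=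
  let nums := bits.zipIdx.foldl (fun acc p => pvInnerA delim p.1.toNat p.1 ((p.2 : Int) * bit_length) acc) []
  match delim with
  | none => String.ofList nums
  | some d => String.ofList (PySem.Chars.slice nums none (some (-(d.toList.length : Int))))

-- ===== PORT B =====
-- The Nat fuel (each iteration clears one set bit, so x.toNat bounds the iteration count) only
-- makes the same computation total.
def pvInnerB : Nat → Int → Int → List (List Char) → List (List Char)
  | 0, _, _, parts => parts
  | f + 1, x, base, parts =>
    if 0 < x then
      pvInnerB f (x - PySem.Int.band x (-x)) base
        (parts ++ [PySem.Int.toChars (base + (PySem.Int.bitLength (PySem.Int.band x (-x)) : Int) - 1)])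
    else parts

def bits_to_nums_alt (bits : List Int) (bit_length : Int) (delim : Option String) (num_length : Option Int) : String :=
  let parts := bits.zipIdx.foldl (fun ps p => pvInnerB p.1.toNat p.1 ((p.2 : Int) * bit_length) ps) []
  String.ofList (PySem.Chars.join (match delim with | none => [] | some d => d.toList) parts)

-- ===== PRECONDITION & SPEC =====
-- Pre_ excludes lists with a negative entry: there A's inner loop (i >>= 1 on a negative int) never terminates.
def Pre_bits_to_nums (bits : List Int) (bit_length : Int) (delim : Option String) (num_length : Option Int) : Prop :=
  ∀ x ∈ bits, 0 ≤ x
instance (bits : List Int) (bit_length : Int) (delim : Option String) (num_length : Option Int) : Decidable (Pre_bits_to_nums bits bit_length delim num_length) := by unfold Pre_bits_to_nums; infer_instance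

def pvWitness_bits_to_nums : List Int × Int × Option String × Option Int := ([5, 3], 2, none, none)

-- On delim = "" with some positive mask A returns "" (its nums[:-len("")] = nums[:0] trim) while B returns
-- the concatenated numbers, which is the intended value for an empty delimiter.
def D_bits_to_nums (bits : List Int) (bit_length : Int) (delim : Option String) (num_length : Option Int) : Prop :=
  delim = some "" ∧ ∃ x ∈ bits, 0 < x
instance (bits : List Int) (bit_length : Int) (delim : Option String) (num_length : Option Int) : Decidable (D_bits_to_nums bits bit_length delim num_length) := by unfold D_bits_to_nums; infer_instance

def Spec_bits_to_nums (bits : List Int) (bit_length : Int) (delim : Option String) (num_length : Option Int) (out : String) : Prop :=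
  ¬ D_bits_to_nums bits bit_length delim num_length → out = bits_to_nums_alt bits bit_length delim num_length
instance (bits : List Int) (bit_length : Int) (delim : Option String) (num_length : Option Int) (out : String) : Decidable (Spec_bits_to_nums bits bit_length delim num_length out) := by unfold Spec_bits_to_nums; infer_instance

def pvDiffWitness_bits_to_nums : List Int × Int × Option String × Option Int := ([1], 1, some "", none)
def pvDiffWitnessOut_bits_to_nums : String × String := ("", "0")

-- ===== CLAIM (what is proved, stated in full; the proofs are below) =====
def Claim_unchanged_bits_to_nums : Prop := ∀ (bits : List Int) (bit_length : Int) (delim : Option String) (num_length : Option Int), Dom_bits_to_nums bits bit_length delim num_length → Pre_bits_to_nums bits bit_length delim num_length → Spec_bits_to_nums bits bit_length delim num_length (bits_to_nums bits bit_length delim num_length)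
def Claim_changed_bits_to_nums : Prop := Dom_bits_to_nums (pvDiffWitness_bits_to_nums.1) (pvDiffWitness_bits_to_nums.2.1) (pvDiffWitness_bits_to_nums.2.2.1) (pvDiffWitness_bits_to_nums.2.2.2) ∧ Pre_bits_to_nums (pvDiffWitness_bits_to_nums.1) (pvDiffWitness_bits_to_nums.2.1) (pvDiffWitness_bits_to_nums.2.2.1) (pvDiffWitness_bits_to_nums.2.2.2) ∧ D_bits_to_nums (pvDiffWitness_bits_to_nums.1) (pvDiffWitness_bits_to_nums.2.1) (pvDiffWitness_bits_to_nums.2.2.1) (pvDiffWitness_bits_to_nums.2.2.2) ∧ bits_to_nums (pvDiffWitness_bits_to_nums.1) (pvDiffWitness_bits_to_nums.2.1) (pvDiffWitness_bits_to_nums.2.2.1) (pvDiffWitness_bits_to_nums.2.2.2) = pvDiffWitnessOut_bits_to_nums.1 ∧ bits_to_nums_alt (pvDiffWitness_bits_to_nums.1) (pvDiffWitness_bits_to_nums.2.1) (pvDiffWitness_bits_to_nums.2.2.1) (pvDiffWitness_bits_to_nums.2.2.2) = pvDiffWitnessOut_bits_to_nums.2 ∧ pvDiffWitnessOut_bits_to_nums.1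 ≠ pvDiffWitnessOut_bits_to_nums.2

def Claim_exact_bits_to_nums : Prop := ∀ (bits : List Int) (bit_length : Int) (delim : Option String) (num_length : Option Int), Dom_bits_to_nums bits bit_length delim num_length → Pre_bits_to_nums bits bit_length delim num_length → D_bits_to_nums bits bit_length delim num_length → bits_to_nums bits bit_length delim num_length ≠ bits_to_nums_alt bits bit_length delim num_length

-- ===== LEMMAS AND PROOFS =====

-- positions of the set bits of m, offset by num (the common specification of both inner loops)
def pvSpecPos (m : Nat) (num : Int) : List Int :=
  if h : 0 < m then (if m % 2 = 1 then [num] else []) ++ pvSpecPos (m / 2) (num + 1) else []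
  termination_by m
  decreasing_by omega

def pvDelimChars (delim : Option String) : List Char :=
  match delim with | none => [] | some d => d.toList

theorem pvSpecPos_zero (num : Int) : pvSpecPos 0 num = [] := by
  rw [pvSpecPos]; simp

theorem pvSpecPos_pos (m : Nat) (num : Int) (h : 0 < m) :
    pvSpecPos m num = (if m % 2 = 1 then [num] else []) ++ pvSpecPos (m / 2) (num + 1) := by
  conv_lhs => rw [pvSpecPos]
  rw [dif_pos h]

theorem pv_band_neg_self (x : Int) (h : 0 < x) :
    PySem.Int.band x (-x) = ((x.toNat - (x.toNat &&& (x.toNat - 1)) : Nat) : Int) := by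
  simp only [PySem.Int.band]
  rw [if_pos (by omega), if_neg (by omega)]
  have : -(-x) - 1 = ((x.toNat - 1 : Nat) : Int) := by omega
  rw [this, Int.toNat_natCast]

theorem pv_and_pred_lt (m : Nat) (h : 0 < m) : m &&& (m - 1) < m :=
  lt_of_le_of_lt Nat.and_le_right (by omega)

theorem pvInnerA_spec (delim : Option String) (fuel : Nat) :
    ∀ (i num : Int) (acc : List Char), 0 ≤ i → i.toNat ≤ fuel →
      pvInnerA delim fuel i num acc =
        acc ++ (pvSpecPos i.toNat num).flatMap (fun v => PySem.Int.toChars v ++ pvDelimChars delim) := by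
  induction fuel with
  | zero =>
    intro i num acc h0 hf
    have hz : i.toNat = 0 := by omega
    rw [pvInnerA, hz, pvSpecPos_zero]
    simp
  | succ f ih =>
    intro i num acc h0 hf
    simp only [pvInnerA]
    by_cases hpos : 0 < i
    · rw [if_pos hpos]
      have hsh : i >>> (1 : Nat) = i / 2 := by rw [Int.shiftRight_eq_div_pow]; norm_num
      have hge : (0 : Int) ≤ i >>> (1 : Nat) := by
        rw [hsh]; exact Int.ediv_nonneg (le_of_lt hpos) (by norm_num)
      have htn : (i >>> (1 : Nat)).toNat = i.toNat / 2 := by rw [hsh]; omega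
      have hmod : PySem.Int.band i 1 = i % 2 := by
        rw [PySem.Int.band_one, PySem.Int.mod_eq_emod_of_pos (by omega)]
      rw [ih _ _ _ hge (by omega), htn, pvSpecPos_pos i.toNat num (by omega)]
      simp only [hmod, List.flatMap_append]
      by_cases hodd : i.toNat % 2 = 1
      · rw [if_pos (by omega), if_pos hodd]
        simp only [List.flatMap_cons, List.flatMap_nil, List.append_nil, List.append_assoc]
        cases delim <;> simp [pvDelimChars]
      · rw [if_neg (by omega), if_neg hodd]
        simp
    · rw [if_neg hpos]
      have hz : i.toNat = 0 := by omega
      rw [hz, pvSpecPos_zero]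
      simp

-- the two halving identities-- the two halving identities behind lowest-bit extraction
theorem pv_and_pred_odd (m : Nat) (h0 : 0 < m) (h : m % 2 = 1) : m &&& (m - 1) = m - 1 := by
  apply Nat.eq_of_testBit_eq
  intro i
  rw [Nat.testBit_and]
  cases i with
  | zero =>
    rw [Nat.testBit_zero, Nat.testBit_zero]
    have : (m - 1) % 2 = 0 := by omega
    simp [this]
  | succ j =>
    rw [Nat.testBit_add_one, Nat.testBit_add_one]
    have : m / 2 = (m - 1) / 2 := by omega
    rw [this, Bool.and_self]

theorem pv_and_pred_even (k : Nat) (h : 0 < k) :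
    (2 * k) &&& (2 * k - 1) = 2 * (k &&& (k - 1)) := by
  apply Nat.eq_of_testBit_eq
  intro i
  rw [Nat.testBit_and]
  cases i with
  | zero =>
    rw [Nat.testBit_zero, Nat.testBit_zero, Nat.testBit_zero]
    have h1 : (2 * k) % 2 = 0 := by omega
    have h2 : (2 * (k &&& (k - 1))) % 2 = 0 := by omega
    simp [h1, h2]
  | succ j =>
    rw [Nat.testBit_add_one, Nat.testBit_add_one, Nat.testBit_add_one]
    have e1 : 2 * k / 2 = k := by omega
    have e2 : (2 * k - 1) / 2 = k - 1 := by omega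
    have e3 : 2 * (k &&& (k - 1)) / 2 = k &&& (k - 1) := by omega
    rw [e1, e2, e3, Nat.testBit_and]

-- key step: extracting the lowest set bit peels off the head of pvSpecPos
theorem pvSpecPos_lowbit (m : Nat) (num : Int) (h : 0 < m) :
    pvSpecPos m num =
      (num + (PySem.Int.bitLength ((m - (m &&& (m - 1)) : Nat) : Int) : Int) - 1)
        :: pvSpecPos (m &&& (m - 1)) num := by
  induction m using Nat.strong_induction_on generalizing num with
  | _ m ih =>
    by_cases hodd : m % 2 = 1
    · rw [pv_and_pred_odd m h hodd]
      have hl : m - (m - 1) = 1 := by omega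
      rw [hl]
      have hbl1 : PySem.Int.bitLength ((1 : Nat) : Int) = 1 := by decide
      rw [hbl1]
      rw [pvSpecPos, dif_pos h, if_pos hodd]
      have hrest : pvSpecPos (m - 1) num = pvSpecPos (m / 2) (num + 1) := by
        by_cases hk : 0 < m / 2
        · have e : m - 1 = 2 * (m / 2) := by omega
          rw [e, pvSpecPos, dif_pos (by omega)]
          rw [if_neg (by omega)]
          have e2 : 2 * (m / 2) / 2 = m / 2 := by omega
          rw [e2]
          simp
        · have e : m - 1 = 0 := by omega
          have e2 : m / 2 = 0 := by omega
          rw [e, e2, pvSpecPos_zero, pvSpecPos_zero]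
      rw [hrest]
      simp
    · -- m even
      have hm : m = 2 * (m / 2) := by omega
      set k := m / 2 with hk
      have hkpos : 0 < k := by omega
      have hand : m &&& (m - 1) = 2 * (k &&& (k - 1)) := by
        rw [hm]; exact pv_and_pred_even k hkpos
      have hlow : m - (m &&& (m - 1)) = 2 * (k - (k &&& (k - 1))) := by
        have := pv_and_pred_lt k hkpos
        have h2 : k &&& (k - 1) ≤ k - 1 := Nat.and_le_right
        omega
      have hbl : PySem.Int.bitLength ((m - (m &&& (m - 1)) : Nat) : Int)
          = PySem.Int.bitLength ((k - (k &&& (k - 1)) : Nat) : Int) + 1 := by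
        rw [hlow]
        rw [PySem.Int.bitLength_natCast (by have := pv_and_pred_lt k hkpos; omega)]
        have e : 2 * (k - (k &&& (k - 1))) / 2 = k - (k &&& (k - 1)) := by omega
        rw [e]
      rw [pvSpecPos, dif_pos h, if_neg hodd]
      rw [ih k (by omega) (num + 1) hkpos]
      rw [hbl]
      have hand2 : pvSpecPos (m &&& (m - 1)) num = pvSpecPos (k &&& (k - 1)) (num + 1) := by
        rw [hand]
        by_cases hz : 0 < k &&& (k - 1)
        · rw [pvSpecPos, dif_pos (by omega)]
          rw [if_neg (by omega)]
          have e3 : 2 * (k &&& (k - 1)) / 2 = k &&& (k - 1) := by omega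
          rw [e3]; simp
        · have e3 : k &&& (k - 1) = 0 := by omega
          rw [e3]; simp [pvSpecPos_zero]
      rw [hand2]
      simp only [List.nil_append]
      congr 1
      push_cast
      ring

theorem pvInnerB_spec (fuel : Nat) :
    ∀ (x base : Int) (parts : List (List Char)), x.toNat ≤ fuel →
      pvInnerB fuel x base parts = parts ++ (pvSpecPos x.toNat base).map PySem.Int.toChars := by
  induction fuel with
  | zero =>
    intro x base parts hf
    have hz : x.toNat = 0 := by omega
    rw [pvInnerB, hz, pvSpecPos_zero]
    simp
  | succ f ih =>
    intro x base parts hf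
    simp only [pvInnerB]
    by_cases hpos : 0 < x
    · rw [if_pos hpos]
      have hlsb : PySem.Int.band x (-x) = ((x.toNat - (x.toNat &&& (x.toNat - 1)) : Nat) : Int) :=
        pv_band_neg_self x hpos
      have hlt : x.toNat &&& (x.toNat - 1) < x.toNat := pv_and_pred_lt x.toNat (by omega)
      have hxt : (x - PySem.Int.band x (-x)).toNat = x.toNat &&& (x.toNat - 1) := by
        have h2 : x.toNat &&& (x.toNat - 1) ≤ x.toNat - 1 := Nat.and_le_right
        rw [hlsb]; omega
      rw [ih _ _ _ (by omega), hxt, pvSpecPos_lowbit x.toNat base (by omega), hlsb]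
      simp
    · rw [if_neg hpos]
      have hz : x.toNat = 0 := by omega
      rw [hz, pvSpecPos_zero]
      simp

-- all set-bit positions-- all set-bit positions of the whole list
def pvAllPos (bits : List Int) (bit_length : Int) : List Int :=
  bits.zipIdx.flatMap (fun p => pvSpecPos p.1.toNat ((p.2 : Int) * bit_length))

theorem pvFoldA (delim : Option String) (bl : Int) (l : List (Int × Nat)) (acc : List Char)
    (h : ∀ p ∈ l, 0 ≤ p.1) :
    l.foldl (fun acc p => pvInnerA delim p.1.toNat p.1 ((p.2 : Int) * bl) acc) acc =
      acc ++ (l.flatMap (fun p => pvSpecPos p.1.toNat ((p.2 : Int) * bl))).flatMap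
        (fun v => PySem.Int.toChars v ++ pvDelimChars delim) := by
  induction l generalizing acc with
  | nil => simp
  | cons p rest ih =>
    simp only [List.foldl_cons, List.flatMap_cons]
    rw [pvInnerA_spec delim p.1.toNat p.1 _ acc (h p (by simp)) le_rfl]
    rw [ih _ (fun q hq => h q (by simp [hq]))]
    simp [List.flatMap_append]

theorem pvFoldB (bl : Int) (l : List (Int × Nat)) (ps : List (List Char)) :
    l.foldl (fun ps p => pvInnerB p.1.toNat p.1 ((p.2 : Int) * bl) ps) ps =
      ps ++ (l.flatMap (fun p => pvSpecPos p.1.toNat ((p.2 : Int) * bl))).map PySem.Int.toChars := by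
  induction l generalizing ps with
  | nil => simp
  | cons p rest ih =>
    simp only [List.foldl_cons, List.flatMap_cons]
    rw [pvInnerB_spec p.1.toNat p.1 _ _ le_rfl, ih]
    simp

-- join with trailing separator
theorem pvJoinTrail (D : List Char) (ps : List (List Char)) (hne : ps ≠ []) :
    ps.flatMap (fun cs => cs ++ D) = PySem.Chars.join D ps ++ D := by
  induction ps with
  | nil => simp at hne
  | cons p rest ih =>
    cases rest with
    | nil => simp [PySem.Chars.join_singleton]
    | cons q rs =>
      rw [PySem.Chars.join_cons_cons]
      simp only [List.flatMap_cons] at *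
      rw [ih (by simp)]
      simp

theorem pvJoinNilSep (ps : List (List Char)) :
    PySem.Chars.join [] ps = ps.flatten := by
  induction ps with
  | nil => simp [PySem.Chars.join_nil]
  | cons p rest ih =>
    cases rest with
    | nil => simp [PySem.Chars.join_singleton]
    | cons q rs =>
      rw [PySem.Chars.join_cons_cons, ih]
      simp

theorem pvSpecPos_ne_nil (m : Nat) (num : Int) (h : 0 < m) : pvSpecPos m num ≠ [] := by
  rw [pvSpecPos_lowbit m num h]
  simp

theorem pvAllPos_nil (bits : List Int) (bl : Int) (h : ∀ x ∈ bits, ¬ 0 < x) :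
    pvAllPos bits bl = [] := by
  unfold pvAllPos
  rw [List.flatMap_eq_nil_iff]
  intro p hp
  have hx : p.1 ∈ bits :=
    List.mem_of_getElem? (List.mem_zipIdx_iff_getElem?.mp hp)
  have : p.1.toNat = 0 := by have := h p.1 hx; omega
  rw [this, pvSpecPos_zero]

theorem pvAllPos_ne_nil (bits : List Int) (bl : Int) (x : Int) (hx : x ∈ bits) (hpos : 0 < x) :
    pvAllPos bits bl ≠ [] := by
  unfold pvAllPos
  rw [Ne, List.flatMap_eq_nil_iff]
  intro hall
  obtain ⟨i, hi, hget⟩ := List.mem_iff_getElem.mp hx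
  have hmem : (x, i) ∈ bits.zipIdx := by
    rw [List.mem_zipIdx_iff_getElem?]
    simp [List.getElem?_eq_getElem hi, hget]
  exact pvSpecPos_ne_nil x.toNat _ (by omega) (hall (x, i) hmem)

-- ===== VERDICT (by name: the statement is the Claim_ definition above) =====
theorem bits_to_nums_spec : Claim_unchanged_bits_to_nums := by
  intro bits bl delim nl _hdom hpre hnd
  show bits_to_nums bits bl delim nl = bits_to_nums_alt bits bl delim nl
  unfold bits_to_nums bits_to_nums_alt
  have hA := pvFoldA delim bl bits.zipIdx []
    (fun p hp => hpre p.1 (List.mem_of_getElem? (List.mem_zipIdx_iff_getElem?.mp hp)))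
  have hB := pvFoldB bl bits.zipIdx ([] : List (List Char))
  simp only [List.nil_append] at hA hB
  have hapd : bits.zipIdx.flatMap (fun p => pvSpecPos p.1.toNat ((p.2 : Int) * bl)) = pvAllPos bits bl := rfl
  rw [hapd] at hA hB
  cases delim with
  | none =>
    dsimp only
    rw [hA, hB, pvJoinNilSep]
    congr 1
    simp only [pvDelimChars, List.append_nil]
    simp [List.flatMap_def]
  | some d =>
    dsimp only
    rw [hA, hB]
    set ap := pvAllPos bits bl with hap
    by_cases hex : ∃ x ∈ bits, 0 < x
    · -- some set bit: ¬D forces d ≠ ""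
      have hdl : d.toList ≠ [] := by
        intro hl
        apply hnd
        refine ⟨?_, hex⟩
        have hememp := congrArg String.ofList hl
        rw [String.ofList_toList] at hememp
        rw [hememp]
      obtain ⟨x, hx, hxp⟩ := hex
      have hne := pvAllPos_ne_nil bits bl x hx hxp
      rw [← hap] at hne
      have hpsne : ap.map PySem.Int.toChars ≠ [] := by
        simpa [List.map_eq_nil_iff] using hne
      have htrail : ap.flatMap (fun v => PySem.Int.toChars v ++ pvDelimChars (some d))
          = PySem.Chars.join d.toList (ap.map PySem.Int.toChars) ++ d.toList := by
        rw [← pvJoinTrail d.toList (ap.map PySem.Int.toChars) hpsne]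
        simp [pvDelimChars, List.flatMap_def, Function.comp_def]
      rw [htrail]
      have hk : 0 < d.toList.length := by
        cases hl : d.toList with
        | nil => exact absurd hl hdl
        | cons c cs => simp
      congr 1
      rw [PySem.Chars.slice_eq_listSlice]
      rw [PySem.List.slice_to_neg_natCast _ _ hk]
      rw [List.length_append]
      rw [show (PySem.Chars.join d.toList (ap.map PySem.Int.toChars)).length + d.toList.length - d.toList.length
            = (PySem.Chars.join d.toList (ap.map PySem.Int.toChars)).length by omega]
      exact List.take_left
    · -- no set bit: both sides are the empty string
      have hnil : ap = [] := hap ▸ pvAllPos_nil bits bl (fun x hx hpos => hex ⟨x, hx, hpos⟩)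
      rw [hnil]
      simp only [List.flatMap_nil, List.map_nil, PySem.Chars.join_nil]
      congr 1
      rw [PySem.Chars.slice_eq_listSlice]
      simp [PySem.List.slice, PySem.List.clampIdx]

theorem bits_to_nums_changed : Claim_changed_bits_to_nums := by
  unfold Claim_changed_bits_to_nums
  refine ⟨by decide, by decide, ⟨rfl, 1, by simp [pvDiffWitness_bits_to_nums]⟩, by decide, by decide, by decide⟩

theorem pv_toDigitsCore_append (b : Nat) :
    ∀ (f n : Nat) (acc : List Char), ∃ l, Nat.toDigitsCore b f n acc = l ++ acc := by
  intro f
  induction f with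
  | zero => intro n acc; exact ⟨[], rfl⟩
  | succ f ih =>
    intro n acc
    simp only [Nat.toDigitsCore]
    by_cases h : n / b = 0
    · exact ⟨[(n % b).digitChar], by simp [h]⟩
    · obtain ⟨l, hl⟩ := ih (n / b) ((n % b).digitChar :: acc)
      exact ⟨l ++ [(n % b).digitChar], by simp [h, hl]⟩

theorem pv_toDigits_ne_nil (n : Nat) : Nat.toDigits 10 n ≠ [] := by
  simp only [Nat.toDigits, Nat.toDigitsCore]
  by_cases h : n / 10 = 0
  · simp [h]
  · obtain ⟨l, hl⟩ := pv_toDigitsCore_append 10 n (n / 10) [(n % 10).digitChar]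
    simp [h, hl]

theorem pv_toChars_ne_nil (n : Int) : PySem.Int.toChars n ≠ [] := by
  simp only [PySem.Int.toChars]
  split_ifs
  · simp
  · exact pv_toDigits_ne_nil _

theorem bits_to_nums_tight : Claim_exact_bits_to_nums := by
  intro bits bl delim nl _hdom hpre hD
  obtain ⟨hdelim, x, hx, hxp⟩ := hD
  subst hdelim
  unfold bits_to_nums bits_to_nums_alt
  dsimp only
  have hA := pvFoldA (some "") bl bits.zipIdx []
    (fun p hp => hpre p.1 (List.mem_of_getElem? (List.mem_zipIdx_iff_getElem?.mp hp)))
  have hB := pvFoldB bl bits.zipIdx ([] : List (List Char))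
  simp only [List.nil_append] at hA hB
  have hapd : bits.zipIdx.flatMap (fun p => pvSpecPos p.1.toNat ((p.2 : Int) * bl)) = pvAllPos bits bl := rfl
  rw [hapd] at hA hB
  rw [hA, hB]
  have hz : ("" : String).toList = ([] : List Char) := by decide
  rw [PySem.Chars.slice_eq_listSlice]
  simp only [hz, List.length_nil, Nat.cast_zero, neg_zero]
  have hsl : ∀ (l : List Char), PySem.List.slice l none (some (0 : Int)) = [] := by
    intro l; simp [PySem.List.slice, PySem.List.clampIdx]
  rw [hsl]
  intro heq
  have hl := congrArg String.toList heq
  simp only [String.toList_ofList] at hl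
  rw [pvJoinNilSep] at hl
  obtain ⟨v, rest, hv⟩ : ∃ v rest, pvAllPos bits bl = v :: rest := by
    cases h : pvAllPos bits bl with
    | nil => exact absurd h (pvAllPos_ne_nil bits bl x hx hxp)
    | cons v rest => exact ⟨v, rest, rfl⟩
  rw [hv] at hl
  simp only [List.map_cons, List.flatten_cons] at hl
  have := pv_toChars_ne_nil v
  rcases List.append_eq_nil_iff.mp hl.symm with ⟨h1, _⟩
  exact this h1
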